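-- pv_equiv track=rewrite | github.com/apple/ml-lucid-datagen | running_baseline/utils_eval_metrics.py | parse_slots_from_intent_call
-- ===== SOURCE A (Python) =====
-- def parse_slots_from_intent_call(command, intent, current_sys_turn_no):
--
--     intent = command[: command.find("(")]
--     command = command[command.find("(") + 1 : -1]
--
--     if command.strip() == "":
--         return None
--     split_points = get_comma_split_points(command)
--     assignments = [
--         command[i + 1 : j].strip().lower()
--         for (i, j) in zip([-1] + split_points, split_points + [len(command)])
--     ]
--
--     return_dict = {}
--
--     # We label an intent with its turn idx, in case of having two of the same intents in a conversation
--     for x in assignments: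
--         return_dict["turn" + str(current_sys_turn_no) + "." + intent + "." + x[: x.find("=")]] = x[
--             x.find("=") + 1 :
--         ]
--
--     return return_dict
--
-- def get_comma_split_points(command):
--
--     quotes_opened = False
--     comma_splits = []
--
--     for idx, char in enumerate(command):
--
--         if char == '"':
--             quotes_opened = not quotes_opened
--         if not quotes_opened and char == ",":
--             comma_splits.append(idx)
--
--     return comma_splits
-- ===== SOURCE B (Python) =====
-- def parse_slots_from_intent_call(command, intent, current_sys_turn_no):
--     p = command.find("(")
--     intent = command[:p]
--     inner = command[p + 1 : -1]
--
--     if inner.strip() == "":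
--         return None
--
--     label = "turn" + str(current_sys_turn_no) + "." + intent + "."
--     result = {}
--
--     def emit(buf):
--         seg = "".join(buf).strip().lower()
--         e = seg.find("=")
--         result[label + seg[:e]] = seg[e + 1 :]
--
--     in_quotes = False
--     buf = []
--     for ch in inner:
--         if ch == '"':
--             in_quotes = not in_quotes
--         if ch == "," and not in_quotes:
--             emit(buf)
--             buf = []
--         else:
--             buf.append(ch)
--     emit(buf)
--     return result
-- ===== Notes on version B (the rewrite author's own statement) =====
-- stated objective: alternative
-- what changed: B replaces A's two-phase parse (build an index table of top-level commas, then zip shifted index pairs into slices) with a single quote-aware streaming pass that buffers each segment and emits it into the dict at every top-level comma and at the end.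
import Mathlib
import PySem

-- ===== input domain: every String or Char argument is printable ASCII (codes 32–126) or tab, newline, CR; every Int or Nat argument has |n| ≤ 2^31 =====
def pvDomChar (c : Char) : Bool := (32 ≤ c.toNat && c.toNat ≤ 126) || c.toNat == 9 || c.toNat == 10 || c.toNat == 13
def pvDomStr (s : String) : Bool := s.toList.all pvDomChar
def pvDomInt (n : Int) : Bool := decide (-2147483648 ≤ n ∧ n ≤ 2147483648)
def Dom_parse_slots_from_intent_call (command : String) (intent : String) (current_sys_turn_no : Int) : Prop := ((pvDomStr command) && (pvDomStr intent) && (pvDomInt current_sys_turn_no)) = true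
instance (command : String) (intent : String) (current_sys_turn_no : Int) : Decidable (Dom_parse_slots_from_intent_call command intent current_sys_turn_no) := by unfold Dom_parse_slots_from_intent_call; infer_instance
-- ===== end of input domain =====

-- B replaces A's two-phase parse (index table of top-level commas, then zip-slice segments)
-- with a single quote-aware streaming pass that accumulates each segment and emits it into
-- the dict at every top-level comma; objective: simpler one-pass decomposition, same output.


-- ===== PORT A =====
-- helper: get_comma_split_points — enumerate scan collecting indices of top-level commas
def get_comma_split_points (command : List Char) : List Int :=
  ((PySem.List.enumerate command 0).foldl
    (fun (st : Bool × List Int) ic =>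
      let quotes_opened := if ic.2 == '"' then !st.1 else st.1
      if !quotes_opened && ic.2 == ',' then (quotes_opened, st.2 ++ [ic.1])
      else (quotes_opened, st.2))
    (false, [])).2

def parse_slots_from_intent_call (command : String) (intent : String) (current_sys_turn_no : Int) : Option (List (String × String)) :=
  let p := PySem.Str.find command "("
  let intent := PySem.List.slice command.toList none (some p)
  let cmd := PySem.List.slice command.toList (some (p + 1)) (some (-1))
  if PySem.Chars.strip cmd == [] then none
  else
    let split_points := get_comma_split_points cmd
    let assignments := (List.zip ((-1) :: split_points) (split_points ++ [(cmd.length : Int)])).map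
      (fun ij => PySem.Chars.lower (PySem.Chars.strip (PySem.List.slice cmd (some (ij.1 + 1)) (some ij.2))))
    let return_dict := assignments.foldl
      (fun (d : PySem.Dict String String) x =>
        let e := PySem.Chars.find x ['=']
        d.insert
          (String.ofList (("turn".toList ++ PySem.Int.toChars current_sys_turn_no ++ ['.'] ++ intent ++ ['.']) ++ PySem.List.slice x none (some e)))
          (String.ofList (PySem.List.slice x (some (e + 1)) none)))
      PySem.Dict.empty
    some return_dict.items

-- ===== PORT B =====
-- helper: emit — finalize one buffered segment (strip+lower, split at first '=') into the dict
def pvEmitB (label : List Char) (d : PySem.Dict String String) (buf : List Char) : PySem.Dict String String :=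
  let seg := PySem.Chars.lower (PySem.Chars.strip buf)
  let e := PySem.Chars.find seg ['=']
  d.insert (String.ofList (label ++ PySem.List.slice seg none (some e)))
           (String.ofList (PySem.List.slice seg (some (e + 1)) none))

def parse_slots_from_intent_call_alt (command : String) (intent : String) (current_sys_turn_no : Int) : Option (List (String × String)) :=
  let p := PySem.Str.find command "("
  let intent := PySem.List.slice command.toList none (some p)
  let inner := PySem.List.slice command.toList (some (p + 1)) (some (-1))
  if PySem.Chars.strip inner == [] then none
  else
    let label := "turn".toList ++ PySem.Int.toChars current_sys_turn_no ++ ['.'] ++ intent ++ ['.']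
    let st := inner.foldl
      (fun (st : Bool × List Char × PySem.Dict String String) ch =>
        let in_quotes := if ch == '"' then !st.1 else st.1
        if ch == ',' && !in_quotes then (in_quotes, [], pvEmitB label st.2.2 st.2.1)
        else (in_quotes, st.2.1 ++ [ch], st.2.2))
      (false, [], PySem.Dict.empty)
    some (pvEmitB label st.2.2 st.2.1).items

-- ===== PRECONDITION & SPEC =====
def Spec_parse_slots_from_intent_call (command : String) (intent : String) (current_sys_turn_no : Int) (out : Option (List (String × String))) : Prop := out = parse_slots_from_intent_call_alt command intent current_sys_turn_no
instance (command : String) (intent : String) (current_sys_turn_no : Int) (out : Option (List (String × String))) : Decidable (Spec_parse_slots_from_intent_call command intent current_sys_turn_no out) := by unfold Spec_parse_slots_from_intent_call; infer_instance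

-- ===== CLAIM (what is proved, stated in full; the proofs are below) =====
def Claim_equal_parse_slots_from_intent_call : Prop := ∀ (command : String) (intent : String) (current_sys_turn_no : Int), Dom_parse_slots_from_intent_call command intent current_sys_turn_no → Spec_parse_slots_from_intent_call command intent current_sys_turn_no (parse_slots_from_intent_call command intent current_sys_turn_no)

-- ===== LEMMAS AND PROOFS =====

-- quote-aware split of a char list into top-level-comma-separated segments:
-- (first segment, remaining segments)
def pvSplitTop : Bool → List Char → List Char × List (List Char)
  | _, [] => ([], [])
  | q, c :: cs =>
    let q' := if c == '"' then !q else q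
    let r := pvSplitTop q' cs
    if c == ',' && !q' then ([], r.1 :: r.2) else (c :: r.1, r.2)

-- recursive characterisation of the comma split points, indices starting at i
def pvCsp (q : Bool) (i : Int) : List Char → List Int
  | [] => []
  | c :: cs =>
    let q' := if c == '"' then !q else q
    if !q' && c == ',' then i :: pvCsp q' (i + 1) cs else pvCsp q' (i + 1) cs

-- the fold step of A's helper, named (definitionally equal to the port's lambda)
def pvStepA (st : Bool × List Int) (ic : Int × Char) : Bool × List Int :=
  let quotes_opened := if ic.2 == '"' then !st.1 else st.1
  if !quotes_opened && ic.2 == ',' then (quotes_opened, st.2 ++ [ic.1])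
  else (quotes_opened, st.2)

-- the fold step of B's scan, named (definitionally equal to the port's lambda)
def pvStepB (label : List Char) (st : Bool × List Char × PySem.Dict String String) (ch : Char) :
    Bool × List Char × PySem.Dict String String :=
  let in_quotes := if ch == '"' then !st.1 else st.1
  if ch == ',' && !in_quotes then (in_quotes, [], pvEmitB label st.2.2 st.2.1)
  else (in_quotes, st.2.1 ++ [ch], st.2.2)

theorem pvStepA_quote (q : Bool) (acc : List Int) (i : Int) :
    pvStepA (q, acc) (i, '"') = (!q, acc) := by cases q <;> simp [pvStepA]

theorem pvStepA_comma (q : Bool) (acc : List Int) (i : Int) :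
    pvStepA (q, acc) (i, ',') = (q, if q then acc else acc ++ [i]) := by
  cases q <;> simp [pvStepA]

theorem pvStepA_other (c : Char) (h1 : c ≠ '"') (h2 : c ≠ ',') (q : Bool) (acc : List Int) (i : Int) :
    pvStepA (q, acc) (i, c) = (q, acc) := by
  simp [pvStepA, h1, h2]

theorem pvStepB_quote (label : List Char) (q : Bool) (buf : List Char) (d : PySem.Dict String String) :
    pvStepB label (q, buf, d) '"' = (!q, buf ++ ['"'], d) := by cases q <;> simp [pvStepB]

theorem pvStepB_comma (label : List Char) (q : Bool) (buf : List Char) (d : PySem.Dict String String) :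
    pvStepB label (q, buf, d) ',' =
      (q, if q then (buf ++ [','], d) else ([], pvEmitB label d buf)) := by
  cases q <;> simp [pvStepB]

theorem pvStepB_other (label : List Char) (c : Char) (h1 : c ≠ '"') (h2 : c ≠ ',')
    (q : Bool) (buf : List Char) (d : PySem.Dict String String) :
    pvStepB label (q, buf, d) c = (q, buf ++ [c], d) := by
  simp [pvStepB, h1, h2]

theorem pvCsp_ge (cs : List Char) : ∀ (q : Bool) (i j : Int), j ∈ pvCsp q i cs → i ≤ j := by
  induction cs with
  | nil => intro q i j h; simp [pvCsp] at h
  | cons c cs ih =>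
    intro q i j h
    simp only [pvCsp] at h
    by_cases hs : (!(if c == '"' then !q else q) && c == ',') = true
    · rw [if_pos hs] at h
      rcases List.mem_cons.mp h with h | h
      · omega
      · have := ih _ _ _ h; omega
    · rw [if_neg hs] at h
      have := ih _ _ _ h; omega

theorem get_comma_split_points_eq_aux (cs : List Char) :
    ∀ (q : Bool) (acc : List Int) (i : Int),
      ((PySem.List.enumerate cs i).foldl pvStepA (q, acc)).2 = acc ++ pvCsp q i cs := by
  induction cs with
  | nil => intro q acc i; simp [PySem.List.enumerate_nil, pvCsp]
  | cons c cs ih =>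
    intro q acc i
    rw [PySem.List.enumerate_cons, List.foldl_cons]
    by_cases h1 : c = '"'
    · subst h1; rw [pvStepA_quote, ih]; cases q <;> simp [pvCsp]
    · by_cases h2 : c = ','
      · subst h2
        rw [pvStepA_comma]
        cases q <;> simp [ih, pvCsp, List.append_assoc]
      · rw [pvStepA_other c h1 h2, ih]
        simp [pvCsp, h1, h2]

theorem get_comma_split_points_eq (cs : List Char) :
    get_comma_split_points cs = pvCsp false 0 cs := by
  have h : get_comma_split_points cs = ((PySem.List.enumerate cs 0).foldl pvStepA (false, [])).2 := rfl
  rw [h, get_comma_split_points_eq_aux]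
  simp

-- one comma-free head char extends the first slice by that char
theorem pvSlice_cons (pre : List Char) (c : Char) (tl : List Char) (j : Int)
    (hj : (pre.length : Int) < j) :
    PySem.List.slice (pre ++ c :: tl) (some (pre.length : Int)) (some j)
      = c :: PySem.List.slice (pre ++ c :: tl) (some ((pre.length : Int) + 1)) (some j) := by
  have hj0 : j = ((j.toNat : Nat) : Int) := by omega
  have h1 : ((pre.length : Nat) : Int) + 1 = (((pre.length + 1 : Nat)) : Int) := by push_cast; ring
  rw [hj0, h1, PySem.List.slice_natCast, PySem.List.slice_natCast]
  have hd1 : (pre ++ c :: tl).drop pre.length = c :: tl := by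
    simp
  have hd2 : (pre ++ c :: tl).drop (pre.length + 1) = tl := by
    rw [← List.drop_drop, hd1]; simp
  rw [hd1, hd2]
  have ht : j.toNat - pre.length = (j.toNat - (pre.length + 1)) + 1 := by omega
  rw [ht, List.take_succ_cons]

-- the zip-slice construction over the split points yields exactly the structural segments
theorem pvSegments_eq (cs : List Char) :
    ∀ (q : Bool) (pre X : List Char), X = pre ++ cs →
      (List.zip (((pre.length : Int) - 1) :: pvCsp q (pre.length : Int) cs)
                (pvCsp q (pre.length : Int) cs ++ [(X.length : Int)])).map
        (fun ij => PySem.List.slice X (some (ij.1 + 1)) (some ij.2))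
      = (pvSplitTop q cs).1 :: (pvSplitTop q cs).2 := by
  induction cs with
  | nil =>
    intro q pre X hX
    subst hX
    simp only [pvCsp, pvSplitTop, List.append_nil, List.nil_append, List.zip_cons_cons,
      List.zip_nil_right, List.map_cons, List.map_nil]
    have e1 : ((pre.length : Int) - 1 + 1) = ((pre.length : Nat) : Int) := by ring
    rw [e1, PySem.List.slice_natCast]
    simp
  | cons c cs ih =>
    intro q pre X hX
    have hX' : X = (pre ++ [c]) ++ cs := by simp [hX]
    have hlen : (((pre ++ [c]).length : Nat) : Int) = (pre.length : Int) + 1 := by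
      simp only [List.length_append, List.length_cons, List.length_nil]; push_cast; ring
    have hIH := ih (if c == '"' then !q else q) (pre ++ [c]) X hX'
    rw [hlen] at hIH
    have hXlen : (pre.length : Int) < (X.length : Int) := by
      rw [hX]; simp only [List.length_append, List.length_cons]; push_cast; omega
    simp only [pvCsp, pvSplitTop]
    have e1 : ((pre.length : Int) - 1 + 1) = ((pre.length : Nat) : Int) := by ring
    rw [Bool.and_comm (c == ',') (!(if c == '"' then !q else q))]
    by_cases hs : (!(if c == '"' then !q else q) && c == ',') = true
    · -- a top-level comma at index pre.length: segment boundary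
      rw [if_pos hs, if_pos hs]
      simp only [List.cons_append, List.zip_cons_cons, List.map_cons]
      have e2 : ((pre.length : Int) + 1 - 1) = ((pre.length : Nat) : Int) := by ring
      rw [e2] at hIH
      rw [e1, PySem.List.slice_natCast]
      simp only [Nat.sub_self, List.take_zero]
      rw [List.cons.injEq]
      exact ⟨rfl, hIH⟩
    · -- no boundary: c is prepended to the first segment
      rw [if_neg hs, if_neg hs]
      set q' := if c == '"' then !q else q with hq'
      have hge : ∀ j ∈ pvCsp q' ((pre.length : Int) + 1) cs, (pre.length : Int) + 1 ≤ j :=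
        fun j hj => pvCsp_ge cs q' _ j hj
      have e2 : ((pre.length : Int) + 1 - 1 + 1) = (pre.length : Int) + 1 := by ring
      cases hScase : pvCsp q' ((pre.length : Int) + 1) cs with
      | nil =>
        rw [hScase] at hIH
        simp only [List.nil_append, List.zip_cons_cons, List.zip_nil_right,
          List.map_cons, List.map_nil] at hIH ⊢
        rw [e2] at hIH
        have hcons := pvSlice_cons pre c cs ((X.length : Int)) hXlen
        rw [hX'] at hIH hcons ⊢
        rw [show pre ++ c :: cs = pre ++ [c] ++ cs from by simp] at hcons
        rw [e1, hcons]
        rw [List.cons.injEq] at hIH ⊢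
        exact ⟨by rw [hIH.1], hIH.2⟩
      | cons j0 S' =>
        rw [hScase] at hIH hge
        have hj0 : (pre.length : Int) + 1 ≤ j0 := hge j0 (by simp)
        simp only [List.cons_append, List.zip_cons_cons, List.map_cons] at hIH ⊢
        rw [e2] at hIH
        have hcons := pvSlice_cons pre c cs j0 (by omega)
        rw [show pre ++ c :: cs = pre ++ [c] ++ cs from by simp] at hcons
        rw [hX'] at hIH ⊢
        rw [e1, hcons]
        rw [List.cons.injEq] at hIH ⊢
        exact ⟨by rw [hIH.1], hIH.2⟩

-- B's streaming fold equals folding the emit step over the structural segments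
theorem pvFoldB_eq (label : List Char) (cs : List Char) :
    ∀ (q : Bool) (buf : List Char) (d : PySem.Dict String String),
      pvEmitB label (cs.foldl (pvStepB label) (q, buf, d)).2.2
        (cs.foldl (pvStepB label) (q, buf, d)).2.1
      = List.foldl (pvEmitB label) d ((buf ++ (pvSplitTop q cs).1) :: (pvSplitTop q cs).2) := by
  induction cs with
  | nil => intro q buf d; simp [pvSplitTop]
  | cons c cs ih =>
    intro q buf d
    rw [List.foldl_cons]
    by_cases h1 : c = '"'
    · subst h1
      rw [pvStepB_quote, ih]
      cases q <;> simp [pvSplitTop, List.append_assoc]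
    · by_cases h2 : c = ','
      · subst h2
        rw [pvStepB_comma]
        cases q <;> simp [ih, pvSplitTop, List.append_assoc]
      · rw [pvStepB_other label c h1 h2, ih]
        simp [pvSplitTop, h1, h2, List.append_assoc]

-- ===== VERDICT (by name: the statement is the Claim_ definition above) =====
theorem parse_slots_from_intent_call_spec : Claim_equal_parse_slots_from_intent_call := by
  unfold Claim_equal_parse_slots_from_intent_call Spec_parse_slots_from_intent_call
  intro command intent n _
  show parse_slots_from_intent_call command intent n = parse_slots_from_intent_call_alt command intent n
  simp only [parse_slots_from_intent_call, parse_slots_from_intent_call_alt]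
  generalize PySem.Str.find command "(" = q at *
  generalize PySem.List.slice command.toList none (some q) = it
  generalize hcmd : PySem.List.slice command.toList (some (q + 1)) (some (-1)) = cmd
  by_cases h : (PySem.Chars.strip cmd == []) = true
  · rw [if_pos h, if_pos h]
  · rw [if_neg h, if_neg h]
    set label := "turn".toList ++ PySem.Int.toChars n ++ ['.'] ++ it ++ ['.'] with hlabel
    congr 1
    -- B side via the streaming-fold lemma (the port's lambda is pvStepB by definition)
    have hB : (cmd.foldl
          (fun (st : Bool × List Char × PySem.Dict String String) ch =>
            let in_quotes := if ch == '"' then !st.1 else st.1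
            if ch == ',' && !in_quotes then (in_quotes, [], pvEmitB label st.2.2 st.2.1)
            else (in_quotes, st.2.1 ++ [ch], st.2.2))
          (false, [], PySem.Dict.empty)) =
        (cmd.foldl (pvStepB label) (false, [], PySem.Dict.empty)) := rfl
    rw [hB, pvFoldB_eq label cmd false [] PySem.Dict.empty]
    -- A side: rewrite split points, then segments, then fuse the maps and folds
    rw [get_comma_split_points_eq]
    have hseg := pvSegments_eq cmd false [] cmd (by simp)
    simp only [List.length_nil, Nat.cast_zero, zero_sub] at hseg
    have hmm : ((List.zip ((-1) :: pvCsp false 0 cmd) (pvCsp false 0 cmd ++ [(cmd.length : Int)])).map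
        (fun ij => PySem.Chars.lower (PySem.Chars.strip (PySem.List.slice cmd (some (ij.1 + 1)) (some ij.2)))))
      = ((List.zip ((-1) :: pvCsp false 0 cmd) (pvCsp false 0 cmd ++ [(cmd.length : Int)])).map
          (fun ij => PySem.List.slice cmd (some (ij.1 + 1)) (some ij.2))).map
            (fun s => PySem.Chars.lower (PySem.Chars.strip s)) := by
      rw [List.map_map]; rfl
    rw [hmm, hseg, List.foldl_map]
    -- the fused step is exactly pvEmitB
    rfl
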